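-- pv_equiv track=rewrite | github.com/sixtwoseventy/joyos | src/xilinx/tools/bittool/rle.py | rleBlockEncode
-- ===== SOURCE A (Python) =====
-- def rleBlockEncode(raw):
--     p = 0
--     blocks = []
--     block = [chr(0)]
--
--     while (p<len(raw)):
--         j = p
--         curByte = raw[p]
--         while (raw[j]==curByte):
--             if ((j+1)==len(raw)):
--                 j+=1
--                 break;
--             if (j-p)>=63:
--                 break;
--             j+=1
--         j-=p
--
--         if (j==1 and (0xC0 != (ord(curByte) & 0xC0))):
--             if (len(block)<128):
--                 block.append(curByte)
--             else:
--                 block[0] = chr(len(block))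
--                 blocks.append(block)
--                 block = [chr(0)]
--                 block.append(curByte)
--         else:
--             if (len(block)<127):
--                 block.append(chr(j | 0xC0))
--                 block.append(curByte)
--             else:
--                 block[0] = chr(len(block))
--                 blocks.append(block)
--                 block = [chr(0)]
--                 block.append(chr(j | 0xC0))
--                 block.append(curByte)
--
--         p+=j
--
--     if (len(block)>1):
--         block[0] = chr(len(block))
--         blocks.append(block)
--
--     blockeddata = []
--     bcount = 0
--     for b in blocks:
--         for d in b:
--             blockeddata.append(d)
--         if (len(b)==127):
--             blockeddata.append(chr(0))
--         bcount+=1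
--
--     return blockeddata
-- ===== SOURCE B (Python) =====
-- def rleBlockEncode(raw):
--     # Pass 1: maximal runs (byte, length, reaches-end-of-input flag).
--     runs = []
--     i = 0
--     n = len(raw)
--     while i < n:
--         j = i + 1
--         while j < n and raw[j] == raw[i]:
--             j += 1
--         runs.append((raw[i], j - i, j == n))
--         i = j
--     # Pass 2: chunk each run under the cap (63, or 64 for a run ending the input)
--     # into items: a bare literal byte, or a [count|0xC0, byte] pair.
--     items = []
--     for c, r, final in runs:
--         while r > (64 if final else 63):
--             items.append([chr(63 | 0xC0), c])
--             r -= 63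
--         if r == 1 and (ord(c) & 0xC0) != 0xC0:
--             items.append([c])
--         else:
--             items.append([chr(r | 0xC0), c])
--     # Pass 3: pack items into blocks under one uniform capacity rule.
--     blocks = []
--     block = [chr(0)]
--     for it in items:
--         if len(block) + len(it) > 128:
--             block[0] = chr(len(block))
--             blocks.append(block)
--             block = [chr(0)]
--         block += it
--     if len(block) > 1:
--         block[0] = chr(len(block))
--         blocks.append(block)
--     # Pass 4: flatten, padding any 127-byte block with a NUL.
--     out = []
--     for b in blocks:
--         out += b
--         if len(b) == 127:
--             out.append(chr(0))
--     return out
-- ===== Notes on version B (the rewrite author's own statement) =====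
-- stated objective: alternative
-- what changed: A's single interleaved loop (scan run, cap it, pack it, flush — all in one while body) is re-decomposed into a four-stage pipeline: maximal-run grouping, chunking each run under the 63 cap (64 for a run ending the input), packing chunks into blocks with one uniform capacity rule len(block)+len(item) <= 128 replacing A's two asymmetric 128/127 thresholds, then flattening.
import Mathlib
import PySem

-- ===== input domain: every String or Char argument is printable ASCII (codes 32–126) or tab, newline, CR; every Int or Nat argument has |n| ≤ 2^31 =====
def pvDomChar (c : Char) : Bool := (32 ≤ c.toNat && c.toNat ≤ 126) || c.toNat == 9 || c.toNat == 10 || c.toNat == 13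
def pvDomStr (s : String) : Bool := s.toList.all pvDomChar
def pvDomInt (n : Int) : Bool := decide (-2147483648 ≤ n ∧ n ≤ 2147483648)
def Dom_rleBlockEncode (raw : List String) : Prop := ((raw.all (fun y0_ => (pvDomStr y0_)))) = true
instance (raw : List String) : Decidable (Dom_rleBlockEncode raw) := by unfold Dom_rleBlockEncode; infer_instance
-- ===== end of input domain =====

-- B re-decomposes A's single interleaved loop into a four-stage pipeline (runs → chunks →
-- blocks → flatten) with one uniform block-capacity rule; same cost, objective: alternative.

-- chr(n) for a code point n
def pyChr (n : Nat) : String := String.mk [Char.ofNat n]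
-- ord(s); Python raises unless s has exactly one character — Pre_ restricts to that case
def pyOrd (s : String) : Nat := (s.toList.headD (Char.ofNat 0)).toNat

-- ===== PORT A =====
-- inner while loop of A: advances j while raw[j]==curByte, with the end-of-input and 63-cap breaks
def aInner (raw : List String) (cur : String) (p j : Nat) : Nat :=
  if _h : j < raw.length then
    if raw.getD j "" == cur then
      if j + 1 == raw.length then j + 1
      else if j - p ≥ 63 then j
      else aInner raw cur p (j + 1)
    else j
  else j
termination_by raw.length - j

theorem aInner_ge (raw : List String) (cur : String) (p j : Nat) : j ≤ aInner raw cur p j := by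
  fun_induction aInner raw cur p j <;> omega

theorem aInner_gt (raw : List String) (p : Nat) (h : p < raw.length) :
    p < aInner raw (raw.getD p "") p p := by
  rw [aInner]
  simp only [h, dif_pos, beq_self_eq_true, if_true]
  split
  · omega
  · split
    · omega
    · exact Nat.lt_of_lt_of_le (Nat.lt_succ_self p) (aInner_ge raw _ p (p + 1))

-- outer while loop of A: state = (blocks, block); "j" in A's body is aInner ... - p
def aOuter (raw : List String) (p : Nat) (blocks : List (List String)) (block : List String) :
    List (List String) × List String :=
  if h : p < raw.length then
    if (aInner raw (raw.getD p "") p p - p) == 1 &&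
        !decide (pyOrd (raw.getD p "") &&& 0xC0 = 0xC0) then
      if block.length < 128 then
        aOuter raw (p + (aInner raw (raw.getD p "") p p - p)) blocks (block ++ [raw.getD p ""])
      else
        aOuter raw (p + (aInner raw (raw.getD p "") p p - p))
          (blocks ++ [block.set 0 (pyChr block.length)]) ([pyChr 0] ++ [raw.getD p ""])
    else
      if block.length < 127 then
        aOuter raw (p + (aInner raw (raw.getD p "") p p - p)) blocks
          (block ++ [pyChr ((aInner raw (raw.getD p "") p p - p) ||| 0xC0), raw.getD p ""])
      else
        aOuter raw (p + (aInner raw (raw.getD p "") p p - p))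
          (blocks ++ [block.set 0 (pyChr block.length)])
          ([pyChr 0] ++ [pyChr ((aInner raw (raw.getD p "") p p - p) ||| 0xC0), raw.getD p ""])
  else (blocks, block)
termination_by raw.length - p
decreasing_by all_goals (have := aInner_gt raw p h; omega)

def rleBlockEncode (raw : List String) : List String :=
  let s := aOuter raw 0 [] [pyChr 0]
  let blocks := if s.2.length > 1 then s.1 ++ [s.2.set 0 (pyChr s.2.length)] else s.1
  blocks.foldl (fun acc b => (acc ++ b) ++ (if b.length == 127 then [pyChr 0] else [])) []

-- ===== PORT B =====
-- pass 1 inner scan: first j ≥ i+1 with raw[j] ≠ raw[i] (or end of list)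
def bScan (raw : List String) (i j : Nat) : Nat :=
  if _h : j < raw.length then
    if raw.getD j "" == raw.getD i "" then bScan raw i (j + 1) else j
  else j
termination_by raw.length - j

theorem bScan_ge (raw : List String) (i j : Nat) : j ≤ bScan raw i j := by
  fun_induction bScan raw i j <;> omega

-- pass 1: maximal runs (byte, length, reaches-end flag)
def bRuns (raw : List String) (i : Nat) : List (String × Nat × Bool) :=
  if h : i < raw.length then
    (raw.getD i "", bScan raw i (i + 1) - i, decide (bScan raw i (i + 1) = raw.length)) ::
      bRuns raw (bScan raw i (i + 1))
  else []
termination_by raw.length - i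
decreasing_by have := bScan_ge raw i (i + 1); omega

-- pass 2 inner: chunk one run into items under the 63/64 cap
def bChunkRun (c : String) (r : Nat) (final : Bool) : List (List String) :=
  if r > (if final then 64 else 63) then
    [pyChr (63 ||| 0xC0), c] :: bChunkRun c (r - 63) final
  else if r == 1 && !decide (pyOrd c &&& 0xC0 = 0xC0) then [[c]]
  else [[pyChr (r ||| 0xC0), c]]
termination_by r
decreasing_by split at * <;> omega

-- pass 2: all items
def bItems (runs : List (String × Nat × Bool)) : List (List String) :=
  runs.foldl (fun acc rn => acc ++ bChunkRun rn.1 rn.2.1 rn.2.2) []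

-- pass 3: pack items into blocks under the uniform capacity rule
def bPack (items : List (List String)) : List (List String) × List String :=
  items.foldl
    (fun s it =>
      if s.2.length + it.length > 128 then
        (s.1 ++ [s.2.set 0 (pyChr s.2.length)], pyChr 0 :: it)
      else (s.1, s.2 ++ it))
    ([], [pyChr 0])

def rleBlockEncode_alt (raw : List String) : List String :=
  let s := bPack (bItems (bRuns raw 0))
  let blocks := if s.2.length > 1 then s.1 ++ [s.2.set 0 (pyChr s.2.length)] else s.1
  blocks.foldl (fun acc b => (acc ++ b) ++ (if b.length == 127 then [pyChr 0] else [])) []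

-- ===== PRECONDITION & SPEC =====
-- pvBadRun raw p e: positions p..e-1 form a maximal run in raw whose element is not a
-- single character and whose chunking reaches a length-1 chunk (a lone element ending the
-- input, or run length ≡ 1 mod 63 elsewhere) — exactly when A applies ord() to it.
def pvBadRun (raw : List String) (p e : Nat) : Bool :=
  decide (p < e) && decide (e ≤ raw.length) &&
  (p == 0 || !(raw.getD (p - 1) "" == raw.getD p "")) &&
  ((List.range e).all fun k => decide (k < p) || raw.getD k "" == raw.getD p "") &&
  (e == raw.length || !(raw.getD e "" == raw.getD p "")) &&
  !((raw.getD p "").toList.length == 1) &&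
  (if e == raw.length then e - p == 1 else (e - p) % 63 == 1)

-- Pre_ excludes exactly the inputs on which Python A raises TypeError (ord() applied to a
-- non-single-character element, see pvBadRun); B raises the same TypeError there, and on
-- every other input A returns normally, so nothing A returns on is excluded.
def Pre_rleBlockEncode (raw : List String) : Prop :=
  ∀ p, p < raw.length → ∀ e, e ≤ raw.length → pvBadRun raw p e = false
instance (raw : List String) : Decidable (Pre_rleBlockEncode raw) := by
  unfold Pre_rleBlockEncode; infer_instance

def pvWitness_rleBlockEncode : List String := ["a", "b", "b", "!"]

def Spec_rleBlockEncode (raw : List String) (out : List String) : Prop := out = rleBlockEncode_alt raw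
instance (raw : List String) (out : List String) : Decidable (Spec_rleBlockEncode raw out) := by
  unfold Spec_rleBlockEncode; infer_instance

-- ===== CLAIM (what is proved, stated in full; the proofs are below) =====
def Claim_equal_rleBlockEncode : Prop :=
  ∀ (raw : List String), Dom_rleBlockEncode raw → Pre_rleBlockEncode raw →
    Spec_rleBlockEncode raw (rleBlockEncode raw)

-- ===== LEMMAS AND PROOFS =====

-- the item A's outer-loop iteration emits for a chunk (cur, j)
def itemOf (cur : String) (j : Nat) : List String :=
  if j == 1 && !decide (pyOrd cur &&& 0xC0 = 0xC0) then [cur] else [pyChr (j ||| 0xC0), cur]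

-- ghost: the stream of items A's outer loop processes, in order
def itemsFrom (raw : List String) (p : Nat) : List (List String) :=
  if h : p < raw.length then
    itemOf (raw.getD p "") (aInner raw (raw.getD p "") p p - p) ::
      itemsFrom raw (p + (aInner raw (raw.getD p "") p p - p))
  else []
termination_by raw.length - p
decreasing_by have := aInner_gt raw p h; omega

theorem aOuter_eq_pack (raw : List String) (p : Nat) (blocks : List (List String))
    (block : List String) :
    aOuter raw p blocks block =
      (itemsFrom raw p).foldl
        (fun s it =>
          if s.2.length + it.length > 128 then
            (s.1 ++ [s.2.set 0 (pyChr s.2.length)], pyChr 0 :: it)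
          else (s.1, s.2 ++ it))
        (blocks, block) := by
  fun_induction aOuter raw p blocks block with
  | case5 p blocks block h => rw [itemsFrom]; simp [h]
  | case1 p blocks block h hcond hlen ih =>
    rw [itemsFrom]
    simp only [h, dif_pos, List.foldl_cons, itemOf, hcond, if_true, List.length_singleton]
    rw [if_neg (by omega)]
    exact ih
  | case2 p blocks block h hcond hlen ih =>
    rw [itemsFrom]
    simp only [h, dif_pos, List.foldl_cons, itemOf, hcond, if_true, List.length_singleton]
    rw [if_pos (by omega)]
    exact ih
  | case3 p blocks block h hcond hlen ih =>
    rw [itemsFrom]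
    simp only [h, dif_pos, List.foldl_cons, itemOf, hcond, Bool.false_eq_true, if_false,
      List.length_cons, List.length_nil]
    rw [if_neg (by omega)]
    exact ih
  | case4 p blocks block h hcond hlen ih =>
    rw [itemsFrom]
    simp only [h, dif_pos, List.foldl_cons, itemOf, hcond, Bool.false_eq_true, if_false,
      List.length_cons, List.length_nil]
    rw [if_pos (by omega)]
    exact ih

theorem bScan_spec_aux (raw : List String) (p j : Nat) (hpj : p < j) (hjl : j ≤ raw.length)
    (hrun : ∀ k, p ≤ k → k < j → raw.getD k "" = raw.getD p "") :
    p < bScan raw p j ∧ bScan raw p j ≤ raw.length ∧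
    (∀ k, p ≤ k → k < bScan raw p j → raw.getD k "" = raw.getD p "") ∧
    (bScan raw p j = raw.length ∨ ¬ raw.getD (bScan raw p j) "" = raw.getD p "") := by
  fun_induction bScan raw p j with
  | case1 j h heq ih =>
    apply ih (by omega) (by omega)
    intro k hk1 hk2
    rcases Nat.lt_or_ge k j with h' | h'
    · exact hrun k hk1 h'
    · have hkj : k = j := by omega
      subst hkj; exact eq_of_beq heq
  | case2 j h hne => exact ⟨hpj, by omega, hrun, Or.inr (by simpa using hne)⟩
  | case3 j h => exact ⟨hpj, by omega, hrun, Or.inl (by omega)⟩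

theorem bScan_spec (raw : List String) (p : Nat) (h : p < raw.length) :
    p < bScan raw p (p + 1) ∧ bScan raw p (p + 1) ≤ raw.length ∧
    (∀ k, p ≤ k → k < bScan raw p (p + 1) → raw.getD k "" = raw.getD p "") ∧
    (bScan raw p (p + 1) = raw.length ∨
      ¬ raw.getD (bScan raw p (p + 1)) "" = raw.getD p "") := by
  apply bScan_spec_aux raw p (p + 1) (by omega) (by omega)
  intro k hk1 hk2
  have : k = p := by omega
  rw [this]

theorem aInner_run_aux (raw : List String) (p e : Nat) (he : e ≤ raw.length)
    (hrun : ∀ k, p ≤ k → k < e → raw.getD k "" = raw.getD p "")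
    (hend : e = raw.length ∨ ¬ raw.getD e "" = raw.getD p "")
    (q j : Nat) (hq : p ≤ q) (hqe : q < e) (hj1 : q ≤ j) (hj2 : j ≤ e) (hj3 : j ≤ q + 63) :
    aInner raw (raw.getD q "") q j =
      if e ≤ q + 63 then e
      else if e = raw.length ∧ e = q + 64 then e
      else q + 63 := by
  have hcq : raw.getD q "" = raw.getD p "" := hrun q hq hqe
  fun_induction aInner raw (raw.getD q "") q j with
  | case1 j h heq hlen =>
    -- returns j + 1, with j + 1 = raw.length
    have hje : j < e := by
      rcases Nat.lt_or_ge j e with h' | h'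
      · exact h'
      · have hj : j = e := by omega
        rcases hend with hl | hne
        · omega
        · exact absurd ((eq_of_beq heq).trans hcq) (hj ▸ hne)
    have : e = j + 1 := by simp at hlen; omega
    subst this
    split
    · rfl
    · rw [if_pos (by simp at hlen; omega)]
  | case2 j h heq hlen hcap =>
    -- returns j, with j - q ≥ 63, so j = q + 63 and j < e
    have hje : j < e := by
      rcases Nat.lt_or_ge j e with h' | h'
      · exact h'
      · have hj : j = e := by omega
        rcases hend with hl | hne
        · omega
        · exact absurd ((eq_of_beq heq).trans hcq) (hj ▸ hne)
    have hj63 : j = q + 63 := by omega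
    simp at hlen
    rw [if_neg (by omega), if_neg (by omega), hj63]
  | case3 j h heq hlen hcap ih =>
    have hje : j < e := by
      rcases Nat.lt_or_ge j e with h' | h'
      · exact h'
      · have hj : j = e := by omega
        rcases hend with hl | hne
        · omega
        · exact absurd ((eq_of_beq heq).trans hcq) (hj ▸ hne)
    exact ih (by omega) (by omega) (by omega)
  | case4 j h hne =>
    -- raw[j] ≠ cur, so j = e (inside the run it would be equal)
    have hje : j = e := by
      rcases Nat.lt_or_ge j e with h' | h'
      · exact absurd ((hrun j (by omega) h').trans hcq.symm) (by simpa using hne)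
      · omega
    rw [if_pos (by omega), hje]
  | case5 j h =>
    have : j = e := by omega
    rw [if_pos (by omega), this]

theorem bItems_cons (rn : String × Nat × Bool) (rest : List (String × Nat × Bool)) :
    bItems (rn :: rest) = bChunkRun rn.1 rn.2.1 rn.2.2 ++ bItems rest := by
  simp [bItems]

theorem run_items (raw : List String) (p e : Nat) (he : e ≤ raw.length)
    (hrun : ∀ k, p ≤ k → k < e → raw.getD k "" = raw.getD p "")
    (hend : e = raw.length ∨ ¬ raw.getD e "" = raw.getD p "") :
    ∀ n q, p ≤ q → q < e → e - q ≤ n →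
      itemsFrom raw q =
        bChunkRun (raw.getD p "") (e - q) (decide (e = raw.length)) ++ itemsFrom raw e := by
  intro n
  induction n with
  | zero => intro q _ h2 h3; omega
  | succ n ih =>
    intro q hq hqe hn
    have hql : q < raw.length := by omega
    have hcq : raw.getD q "" = raw.getD p "" := hrun q hq hqe
    rw [itemsFrom]
    simp only [hql, dif_pos]
    rw [aInner_run_aux raw p e he hrun hend q q hq hqe (le_refl q) (by omega) (by omega), hcq]
    by_cases h1 : e ≤ q + 63
    · rw [if_pos h1, show q + (e - q) = e from by omega, bChunkRun,
        if_neg (by split <;> omega), itemOf]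
      split <;> rfl
    · by_cases h2 : e = raw.length ∧ e = q + 64
      · rw [if_neg h1, if_pos h2, show q + (e - q) = e from by omega, bChunkRun,
          show e - q = 64 from by omega, decide_eq_true h2.1,
          if_neg (by simp)]
        simp [itemOf]
      · have hcap : e - q > if decide (e = raw.length) = true then 64 else 63 := by
          by_cases hel : e = raw.length
          · have h2' : e ≠ q + 64 := fun hh => h2 ⟨hel, hh⟩
            rw [decide_eq_true hel, if_pos rfl]; omega
          · rw [decide_eq_false hel, if_neg (by simp)]; omega
        rw [if_neg h1, if_neg h2, show q + (q + 63 - q) = q + 63 from by omega,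
          bChunkRun, if_pos hcap,
          ih (q + 63) (by omega) (by omega) (by omega),
          show q + 63 - q = 63 from by omega,
          show e - (q + 63) = e - q - 63 from by omega]
        simp [itemOf]

theorem itemsFrom_eq_bItems_aux (raw : List String) :
    ∀ n p, raw.length - p ≤ n → itemsFrom raw p = bItems (bRuns raw p) := by
  intro n
  induction n with
  | zero =>
    intro p hp
    have h : ¬ p < raw.length := by omega
    rw [itemsFrom, bRuns]
    simp [h, bItems]
  | succ n ih =>
    intro p hp
    by_cases h : p < raw.length
    · obtain ⟨h1, h2, h3, h4⟩ := bScan_spec raw p h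
      rw [bRuns]
      simp only [h, dif_pos]
      rw [bItems_cons]
      exact (run_items raw p (bScan raw p (p + 1)) h2 h3 h4 (bScan raw p (p + 1) - p) p
        (le_refl p) h1 (le_refl _)).trans (by rw [ih (bScan raw p (p + 1)) (by omega)])
    · rw [itemsFrom, bRuns]
      simp [h, bItems]

theorem itemsFrom_eq_bItems (raw : List String) (p : Nat) :
    itemsFrom raw p = bItems (bRuns raw p) :=
  itemsFrom_eq_bItems_aux raw (raw.length - p) p (le_refl _)

-- ===== VERDICT (by name: the statement is the Claim_ definition above) =====
theorem rleBlockEncode_spec : Claim_equal_rleBlockEncode := by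
  intro raw _ _
  unfold Spec_rleBlockEncode rleBlockEncode rleBlockEncode_alt bPack
  rw [aOuter_eq_pack, itemsFrom_eq_bItems]
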